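-- pv_equiv track=rewrite | github.com/moizraja70-ai/my-website | extract_head_neck_dentaldevotee.py | merge_split_option_lines
-- ===== SOURCE A (Python) =====
-- from typing import Dict, Iterable, List, Optional, Sequence, Tuple
--
-- def merge_split_option_lines(lines: List[str]) -> List[str]:
--     merged: List[str] = []
--     i = 0
--     while i < len(lines):
--         ln = lines[i]
--         if i + 1 < len(lines):
--             nxt = lines[i + 1]
--             if len(ln) == 1 and ln.isalpha() and ln.upper() in "ABCDEFGH" and nxt.lstrip("*").startswith(")"):
--                 letter = ln.upper()
--                 rest = nxt.lstrip("*")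
--                 if rest.startswith(")"):
--                     rest = rest[1:].lstrip()
--                 merged.append(f"{letter}) {rest}")
--                 i += 2
--                 continue
--             if len(ln) == 2 and ln[0].isalpha() and ln[1] == ")" and ln[0].upper() in "ABCDEFGH" and nxt.strip().startswith("***"):
--                 letter = ln.upper()
--                 merged.append(f"{letter} {nxt.strip()}")
--                 i += 2
--                 continue
--         merged.append(ln)
--         i += 1
--     return merged
-- ===== SOURCE B (Python) =====
-- from typing import List
--
-- def _classify(ln: str) -> int:
--     if len(ln) == 1 and ln.isalpha() and ln.upper() in "ABCDEFGH":
--         return 1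
--     if len(ln) == 2 and ln[0].isalpha() and ln[1] == ")" and ln[0].upper() in "ABCDEFGH":
--         return 2
--     return 0
--
-- def merge_split_option_lines(lines: List[str]) -> List[str]:
--     out: List[str] = []
--     pending = None  # (kind, line): a candidate waiting for its continuation
--     for cur in lines:
--         if pending is not None:
--             kind, p = pending
--             pending = None
--             if kind == 1 and cur.lstrip("*").startswith(")"):
--                 rest = cur.lstrip("*")[1:].lstrip()
--                 out.append(f"{p.upper()}) {rest}")
--                 continue
--             if kind == 2 and cur.strip().startswith("***"):
--                 out.append(f"{p.upper()} {cur.strip()}")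
--                 continue
--             out.append(p)
--         k = _classify(cur)
--         if k:
--             pending = (k, cur)
--         else:
--             out.append(cur)
--     if pending is not None:
--         out.append(pending[1])
--     return out
-- ===== Notes on version B (the rewrite author's own statement) =====
-- stated objective: alternative
-- what changed: Replaced the index-based while loop with lookahead (lines[i+1], i += 2 skips) by a single forward fold that threads a 'pending candidate' accumulator: each line either merges with the pending candidate, flushes it, becomes the new candidate, or is emitted, with a final flush after the loop.
import Mathlib
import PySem

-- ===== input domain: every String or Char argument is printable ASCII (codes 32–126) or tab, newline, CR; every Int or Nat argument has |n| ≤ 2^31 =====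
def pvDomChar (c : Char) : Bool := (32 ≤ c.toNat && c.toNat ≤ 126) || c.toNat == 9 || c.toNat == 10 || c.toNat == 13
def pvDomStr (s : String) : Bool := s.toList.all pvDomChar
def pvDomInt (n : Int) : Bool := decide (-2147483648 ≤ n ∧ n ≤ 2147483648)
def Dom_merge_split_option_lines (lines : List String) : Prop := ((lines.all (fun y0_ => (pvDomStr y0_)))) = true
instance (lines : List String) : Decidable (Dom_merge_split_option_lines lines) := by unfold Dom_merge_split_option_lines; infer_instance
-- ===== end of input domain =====

-- B replaces A's index-with-lookahead while loop by a single forward fold threading a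
-- pending-candidate accumulator (objective: alternative decomposition, same cost).


-- ===== PORT A =====
-- Python s.lstrip("*"): drop the leading '*' characters (exact: chars argument is the single char '*')
def pvLstripStar (s : String) : String := String.ofList (s.toList.dropWhile (· == '*'))

-- 'len(ln) == 1 and ln.isalpha() and ln.upper() in "ABCDEFGH"' (the ln-only part of A's first guard)
def pvIsBareLetter (ln : String) : Bool :=
  (PySem.Str.len ln == 1) && PySem.Str.strIsalpha ln && PySem.Str.isIn (PySem.Str.upper ln) "ABCDEFGH"

-- 'len(ln) == 2 and ln[0].isalpha() and ln[1] == ")" and ln[0].upper() in "ABCDEFGH"' (ln-only part of A's second guard)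
def pvIsLetterParen (ln : String) : Bool :=
  (PySem.Str.len ln == 2) &&
  (match ln.toList with
   | c0 :: c1 :: _ =>
       PySem.Chars.isalpha c0 && (c1 == ')') &&
       PySem.Str.isIn (String.ofList [PySem.Chars.upperChar c0]) "ABCDEFGH"
   | _ => false)

def merge_split_option_lines : List String → List String
  | [] => []
  | [ln] => [ln]
  | ln :: nxt :: rest =>
    if pvIsBareLetter ln && PySem.Str.startswith (pvLstripStar nxt) ")" then
      let letter := PySem.Str.upper ln
      let r := pvLstripStar nxt
      let r := if PySem.Str.startswith r ")" then PySem.Str.lstrip (PySem.Str.slice r (some 1) none) else r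
      (letter ++ ") " ++ r) :: merge_split_option_lines rest
    else if pvIsLetterParen ln && PySem.Str.startswith (PySem.Str.strip nxt) "***" then
      (PySem.Str.upper ln ++ " " ++ PySem.Str.strip nxt) :: merge_split_option_lines rest
    else
      ln :: merge_split_option_lines (nxt :: rest)

-- ===== PORT B =====
-- Source B's _classify: 1 = bare option letter, 2 = "A)" form, 0 = neither
def pvClassify (ln : String) : Nat :=
  if pvIsBareLetter ln then 1
  else if pvIsLetterParen ln then 2
  else 0

-- one iteration of Source B's for loop over (out, pending)
def pvStep (st : List String × Option (Nat × String)) (cur : String) : List String × Option (Nat × String) :=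
  let flushThenClassify : List String → List String × Option (Nat × String) := fun out =>
    let k := pvClassify cur
    if k == 0 then (out ++ [cur], none) else (out, some (k, cur))
  match st with
  | (out, some (kind, p)) =>
    if kind == 1 && PySem.Str.startswith (pvLstripStar cur) ")" then
      (out ++ [PySem.Str.upper p ++ ") " ++
        PySem.Str.lstrip (PySem.Str.slice (pvLstripStar cur) (some 1) none)], none)
    else if kind == 2 && PySem.Str.startswith (PySem.Str.strip cur) "***" then
      (out ++ [PySem.Str.upper p ++ " " ++ PySem.Str.strip cur], none)
    else
      flushThenClassify (out ++ [p])
  | (out, none) => flushThenClassify out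

def merge_split_option_lines_alt (lines : List String) : List String :=
  match lines.foldl pvStep ([], none) with
  | (out, some (_, p)) => out ++ [p]
  | (out, none) => out

-- ===== PRECONDITION & SPEC =====
def Spec_merge_split_option_lines (lines : List String) (out : List String) : Prop := out = merge_split_option_lines_alt lines
instance (lines : List String) (out : List String) : Decidable (Spec_merge_split_option_lines lines out) := by unfold Spec_merge_split_option_lines; infer_instance

-- ===== CLAIM (what is proved, stated in full; the proofs are below) =====
def Claim_equal_merge_split_option_lines : Prop := ∀ (lines : List String), Dom_merge_split_option_lines lines → Spec_merge_split_option_lines lines (merge_split_option_lines lines)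

-- ===== LEMMAS AND PROOFS =====

def pvFlush : List String × Option (Nat × String) → List String
  | (out, some (_, p)) => out ++ [p]
  | (out, none) => out

theorem pv_invariant (n : Nat) :
    ∀ lines : List String, lines.length ≤ n → ∀ out : List String,
      pvFlush (lines.foldl pvStep (out, none)) = out ++ merge_split_option_lines lines := by
  induction n with
  | zero =>
    intro lines h out
    have : lines = [] := List.eq_nil_of_length_eq_zero (Nat.le_zero.mp h)
    subst this; simp [pvFlush, merge_split_option_lines]
  | succ n ih =>
    intro lines h out
    match lines with
    | [] => simp [pvFlush, merge_split_option_lines]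
    | ln :: tail =>
      simp only [List.foldl_cons]
      by_cases h1 : pvIsBareLetter ln = true
      · -- classify = 1; pending becomes (1, ln)
        cases tail with
        | nil =>
          simp [pvStep, pvClassify, h1, pvFlush, merge_split_option_lines]
        | cons nxt rest =>
          have hstep : pvStep (out, none) ln = (out, some (1, ln)) := by
            simp [pvStep, pvClassify, h1]
          rw [hstep, List.foldl_cons]
          by_cases h2 : PySem.Chars.startswith (pvLstripStar nxt).toList [')'] = true
          · have hstep2 : pvStep (out, some (1, ln)) nxt =
                (out ++ [PySem.Str.upper ln ++ ") " ++
                  PySem.Str.lstrip (PySem.Str.slice (pvLstripStar nxt) (some 1) none)], none) := by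
              simp [pvStep, h2]
            rw [hstep2, ih rest (by simp at h ⊢; omega)]
            simp [merge_split_option_lines, h1, h2]
          · have hstep2 : pvStep (out, some (1, ln)) nxt = pvStep (out ++ [ln], none) nxt := by
              simp [pvStep, h2]
            rw [hstep2, ← List.foldl_cons, ih (nxt :: rest) (by simp at h ⊢; omega)]
            have hlen : ln.length = 1 := by
              simp only [pvIsBareLetter, Bool.and_eq_true, beq_iff_eq, PySem.Str.len_eq] at h1
              exact_mod_cast h1.1.1
            have hlp : pvIsLetterParen ln = false := by
              simp [pvIsLetterParen, hlen]
            simp [merge_split_option_lines, h1, h2, hlp]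
      · by_cases h2c : pvIsLetterParen ln = true
        · -- classify = 2
          cases tail with
          | nil =>
            simp [pvStep, pvClassify, h1, h2c, pvFlush, merge_split_option_lines]
          | cons nxt rest =>
            have hstep : pvStep (out, none) ln = (out, some (2, ln)) := by
              simp [pvStep, pvClassify, h1, h2c]
            rw [hstep, List.foldl_cons]
            by_cases h2 : PySem.Chars.startswith (PySem.Chars.strip nxt.toList) ['*', '*', '*'] = true
            · have hstep2 : pvStep (out, some (2, ln)) nxt =
                  (out ++ [PySem.Str.upper ln ++ " " ++ PySem.Str.strip nxt], none) := by
                simp [pvStep, h2]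
              rw [hstep2, ih rest (by simp at h ⊢; omega)]
              simp [merge_split_option_lines, h1, h2c, h2]
            · have hstep2 : pvStep (out, some (2, ln)) nxt = pvStep (out ++ [ln], none) nxt := by
                simp [pvStep, h2]
              rw [hstep2, ← List.foldl_cons, ih (nxt :: rest) (by simp at h ⊢; omega)]
              simp [merge_split_option_lines, h1, h2]
        · -- classify = 0: ln is emitted directly
          have hstep : pvStep (out, none) ln = (out ++ [ln], none) := by
            simp [pvStep, pvClassify, h1, h2c]
          rw [hstep, ih tail (by simp at h ⊢; omega)]
          cases tail with
          | nil => simp [merge_split_option_lines]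
          | cons nxt rest => simp [merge_split_option_lines, h1, h2c]

-- ===== VERDICT (by name: the statement is the Claim_ definition above) =====
theorem merge_split_option_lines_spec : Claim_equal_merge_split_option_lines := by
  intro lines _
  unfold Spec_merge_split_option_lines merge_split_option_lines_alt
  have := pv_invariant lines.length lines le_rfl []
  simp only [pvFlush, List.nil_append] at this
  rw [← this]
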